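-- pv_equiv track=rewrite | github.com/ruby0322/DFS_Simulator | dfs_simulator.py | count_block
-- ===== SOURCE A (Python) =====
-- DISCOVERED_ROAD: int = 0
--
-- WALL: int = 2
--
-- def count_block(matrix: list[list[int]]) -> tuple[int, int]:
--     wall: int = 0
--     discovered: int = 0
--     for row in matrix:
--         for elem in row:
--             if elem == DISCOVERED_ROAD:
--                 discovered += 1
--             elif elem == WALL:
--                 wall += 1
--     return (discovered, wall)
-- ===== SOURCE B (Python) =====
-- from collections import Counter
-- from itertools import chain
--
-- DISCOVERED_ROAD: int = 0
--
-- WALL: int = 2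
--
-- def count_block(matrix: list[list[int]]) -> tuple[int, int]:
--     counts = Counter(chain.from_iterable(matrix))
--     return (counts[DISCOVERED_ROAD], counts[WALL])
-- ===== Notes on version B (the rewrite author's own statement) =====
-- stated objective: idiomatic
-- what changed: Replaces the nested loops with two conditional accumulators by flattening the matrix and building a single Counter frequency table, then looking up the two block values.
import Mathlib
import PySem

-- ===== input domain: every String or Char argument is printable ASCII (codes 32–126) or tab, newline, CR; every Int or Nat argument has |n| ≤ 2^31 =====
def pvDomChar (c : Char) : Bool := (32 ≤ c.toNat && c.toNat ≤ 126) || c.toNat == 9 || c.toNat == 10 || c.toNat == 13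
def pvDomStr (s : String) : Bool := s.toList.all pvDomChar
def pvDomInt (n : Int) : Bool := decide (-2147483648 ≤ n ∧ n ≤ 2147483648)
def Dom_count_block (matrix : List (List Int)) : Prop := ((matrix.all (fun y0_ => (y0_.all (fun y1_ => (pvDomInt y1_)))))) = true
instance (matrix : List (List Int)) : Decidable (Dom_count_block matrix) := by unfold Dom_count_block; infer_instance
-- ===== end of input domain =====

-- B replaces A's nested loops with two conditional accumulators by a flatten + frequency-table (Counter) decomposition; objective: idiomatic.

-- ===== PORT A =====
-- nested for-loops keeping two running accumulators (wall, discovered)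
def count_block (matrix : List (List Int)) : Int × Int :=
  let st := matrix.foldl (fun st row =>
    row.foldl (fun st elem =>
      if elem == (0 : Int) then (st.1, st.2 + 1)
      else if elem == (2 : Int) then (st.1 + 1, st.2)
      else st) st) ((0 : Int), (0 : Int))
  (st.2, st.1)

-- ===== PORT B =====
-- Counter(chain.from_iterable(matrix)), then two lookups with default 0
def count_block_alt (matrix : List (List Int)) : Int × Int :=
  let counts := PySem.Dict.counter (matrix.flatMap id)
  (counts.getD 0 0, counts.getD 2 0)

-- ===== PRECONDITION & SPEC =====
def Spec_count_block (matrix : List (List Int)) (out : Int × Int) : Prop := out = count_block_alt matrix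
instance (matrix : List (List Int)) (out : Int × Int) : Decidable (Spec_count_block matrix out) := by unfold Spec_count_block; infer_instance

-- ===== CLAIM (what is proved, stated in full; the proofs are below) =====
def Claim_equal_count_block : Prop := ∀ (matrix : List (List Int)), Dom_count_block matrix → Spec_count_block matrix (count_block matrix)

-- ===== LEMMAS AND PROOFS =====

theorem count_block_row_fold (row : List Int) (st : Int × Int) :
    row.foldl (fun st elem =>
      if elem == (0 : Int) then (st.1, st.2 + 1)
      else if elem == (2 : Int) then (st.1 + 1, st.2)
      else st) st = (st.1 + row.count 2, st.2 + row.count 0) := by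
  induction row generalizing st with
  | nil => simp
  | cons x xs ih =>
    simp only [List.foldl_cons, List.count_cons, ih]
    by_cases h0 : x = 0
    · subst h0; simp [Prod.ext_iff]; omega
    · by_cases h2 : x = 2
      · subst h2; simp [Prod.ext_iff]; omega
      · simp [h0, h2]

theorem count_block_fold (matrix : List (List Int)) (st : Int × Int) :
    matrix.foldl (fun st row =>
      row.foldl (fun st elem =>
        if elem == (0 : Int) then (st.1, st.2 + 1)
        else if elem == (2 : Int) then (st.1 + 1, st.2)
        else st) st) st
    = (st.1 + (matrix.flatMap id).count 2, st.2 + (matrix.flatMap id).count 0) := by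
  induction matrix generalizing st with
  | nil => simp
  | cons r rs ih =>
    rw [List.foldl_cons, count_block_row_fold, ih]
    simp only [List.flatMap_cons, List.count_append, id, Prod.mk.injEq]
    constructor <;> (push_cast; ring)

-- ===== VERDICT (by name: the statement is the Claim_ definition above) =====
theorem count_block_spec : Claim_equal_count_block := by
  intro matrix _
  unfold Spec_count_block count_block count_block_alt
  simp only [count_block_fold, PySem.Dict.getD_counter]
  simp
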